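-- pv_equiv track=rewrite | github.com/teamdlok/Visa_application_automatization | REQUEST_ANKETA_BLANK.py | address_splitter
-- ===== SOURCE A (Python) =====
-- def address_splitter(address_of_living):
--     string_is_too_big = False
--     address_str = ""
--     address_next_str = ""
--     address_of_living = address_of_living.split()
--     for index, word in enumerate(address_of_living):
--         if index == 0:
--                 address_str = word
--         else:
--                 if not len(address_str + word) > 42 and string_is_too_big == False:
--                         address_str += f" {word}"
--
--                 else:
--                         address_next_str += f" {word}"
--                         string_is_too_big = True
--
--     return address_str, address_next_str
-- ===== SOURCE B (Python) =====
-- def _cut_from(total, rest):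
--     # number of further words that still fit on line 1, given its current length
--     k = 0
--     for w in rest:
--         if total + len(w) > 42:
--             break
--         total += 1 + len(w)
--         k += 1
--     return k
--
--
-- def address_splitter(address_of_living):
--     words = address_of_living.split()
--     if not words:
--         return "", ""
--     cut = 1 + _cut_from(len(words[0]), words[1:])
--     return " ".join(words[:cut]), "".join(" " + w for w in words[cut:])
-- ===== Notes on version B (the rewrite author's own statement) =====
-- stated objective: simpler
-- what changed: A threads a (flag, line1, line2) triple through one enumerated loop that grows both strings word by word; B first computes the cut index by a pure arithmetic scan over word lengths and then builds the two lines by joining the two slices.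
import Mathlib
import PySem

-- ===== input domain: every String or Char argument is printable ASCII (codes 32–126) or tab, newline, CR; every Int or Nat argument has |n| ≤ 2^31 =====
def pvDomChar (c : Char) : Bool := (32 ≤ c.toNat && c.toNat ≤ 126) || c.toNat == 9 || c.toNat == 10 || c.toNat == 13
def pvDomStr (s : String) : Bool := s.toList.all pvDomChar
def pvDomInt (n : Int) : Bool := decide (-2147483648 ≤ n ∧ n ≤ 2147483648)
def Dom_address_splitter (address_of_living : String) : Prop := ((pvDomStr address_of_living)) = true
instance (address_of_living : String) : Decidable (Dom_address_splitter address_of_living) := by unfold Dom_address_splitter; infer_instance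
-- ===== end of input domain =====

-- B replaces A's flag-and-two-accumulators loop by an arithmetic scan for the cut index
-- followed by two slice joins (objective: simpler decomposition, same cost).

-- ===== PORT A =====
-- one iteration of A's for-loop over enumerate(words): state = (string_is_too_big, address_str, address_next_str)
def aStep (st : Bool × String × String) (p : Int × String) : Bool × String × String :=
  if p.1 = 0 then (st.1, p.2, st.2.2)
  else if PySem.Str.len (st.2.1 ++ p.2) ≤ 42 ∧ st.1 = false then
    (st.1, st.2.1 ++ " " ++ p.2, st.2.2)
  else
    (true, st.2.1, st.2.2 ++ " " ++ p.2)

def address_splitter (address_of_living : String) : String × String :=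
  let st := (PySem.List.enumerate (PySem.Str.split₀ address_of_living)).foldl aStep (false, "", "")
  (st.2.1, st.2.2)

-- ===== PORT B =====
-- port of _cut_from: how many of `rest` still fit on line 1 of current length `total`
def cutFrom (total : Int) : List String → Nat
  | [] => 0
  | w :: t =>
    if total + PySem.Str.len w > 42 then 0
    else cutFrom (total + 1 + PySem.Str.len w) t + 1

-- port of "".join(" " + w for w in ws)
def joinSp : List String → String
  | [] => ""
  | w :: t => " " ++ w ++ joinSp t

def address_splitter_alt (address_of_living : String) : String × String :=
  match PySem.Str.split₀ address_of_living with
  | [] => ("", "")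
  | w0 :: rest =>
    let cut := 1 + cutFrom (PySem.Str.len w0) rest
    (PySem.Str.join " " ((w0 :: rest).take cut), joinSp ((w0 :: rest).drop cut))

-- ===== PRECONDITION & SPEC =====
def Spec_address_splitter (address_of_living : String) (out : String × String) : Prop := out = address_splitter_alt address_of_living
instance (address_of_living : String) (out : String × String) : Decidable (Spec_address_splitter address_of_living out) := by unfold Spec_address_splitter; infer_instance

-- ===== CLAIM (what is proved, stated in full; the proofs are below) =====
def Claim_equal_address_splitter : Prop := ∀ (address_of_living : String), Dom_address_splitter address_of_living → Spec_address_splitter address_of_living (address_splitter address_of_living)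

-- ===== LEMMAS AND PROOFS =====

theorem strLen_append (s t : String) :
    PySem.Str.len (s ++ t) = PySem.Str.len s + PySem.Str.len t := by
  simp [PySem.Str.len_eq]

-- once the flag is set, A sends every remaining word to the second line
theorem foldl_aStep_true (l : List String) : ∀ (s : Int), 1 ≤ s → ∀ (s1 s2 : String),
    (PySem.List.enumerate l s).foldl aStep (true, s1, s2) = (true, s1, s2 ++ joinSp l) := by
  induction l with
  | nil => intro s _ s1 s2; simp [PySem.List.enumerate_nil, joinSp]
  | cons w t ih =>
    intro s hs s1 s2
    have hne : s ≠ 0 := by omega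
    rw [PySem.List.enumerate_cons]
    simp only [List.foldl_cons, aStep, hne, if_false]
    rw [if_neg (by simp)]
    rw [ih (s + 1) (by omega)]
    simp [joinSp, String.append_assoc]

-- joinWith s1 l is A's accumulator after appending " "+w for each w in l
def joinWith (s1 : String) (l : List String) : String :=
  l.foldl (fun a w => a ++ " " ++ w) s1

theorem joinWith_eq (l : List String) : ∀ (s1 : String), joinWith s1 l = s1 ++ joinSp l := by
  induction l with
  | nil => intro s1; simp [joinWith, joinSp]
  | cons w t ih =>
    intro s1
    simp only [joinWith, List.foldl_cons, joinSp]
    rw [show (List.foldl (fun a w => a ++ " " ++ w) (s1 ++ " " ++ w) t) = joinWith (s1 ++ " " ++ w) t from rfl]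
    rw [ih]
    simp [String.append_assoc]

-- main invariant: A's loop from a clean flag realises B's cut
theorem foldl_aStep_false (l : List String) : ∀ (s : Int), 1 ≤ s → ∀ (s1 s2 : String),
    (PySem.List.enumerate l s).foldl aStep (false, s1, s2) =
      (decide (cutFrom (PySem.Str.len s1) l ≠ l.length),
       joinWith s1 (l.take (cutFrom (PySem.Str.len s1) l)),
       s2 ++ joinSp (l.drop (cutFrom (PySem.Str.len s1) l))) := by
  induction l with
  | nil =>
    intro s _ s1 s2
    simp [PySem.List.enumerate_nil, cutFrom, joinWith, joinSp]
  | cons w t ih =>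
    intro s hs s1 s2
    have hne : s ≠ 0 := by omega
    rw [PySem.List.enumerate_cons]
    simp only [List.foldl_cons, aStep, hne, if_false]
    by_cases hc : PySem.Str.len (s1 ++ w) ≤ 42
    · rw [if_pos ⟨hc, trivial⟩]
      rw [ih (s + 1) (by omega)]
      have hone : PySem.Str.len " " = 1 := by decide
      have hlen : PySem.Str.len (s1 ++ " " ++ w) = PySem.Str.len s1 + 1 + PySem.Str.len w := by
        rw [strLen_append, strLen_append, hone]
      have hcut : cutFrom (PySem.Str.len s1) (w :: t)
          = cutFrom (PySem.Str.len s1 + 1 + PySem.Str.len w) t + 1 := by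
        rw [cutFrom, if_neg (by rw [strLen_append] at hc; omega)]
      rw [hcut, hlen]
      simp only [List.take_succ_cons, List.drop_succ_cons, List.length_cons]
      exact congrArg₂ Prod.mk (decide_eq_decide.mpr (by omega)) rfl
    · rw [if_neg (by intro h; exact hc h.1)]
      rw [foldl_aStep_true t (s + 1) (by omega)]
      have hcut : cutFrom (PySem.Str.len s1) (w :: t) = 0 := by
        rw [cutFrom, if_pos (by rw [strLen_append] at hc; omega)]
      rw [hcut]
      simp [joinWith, joinSp, String.append_assoc]

theorem join_space_cons (l : List String) : ∀ (w0 : String),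
    PySem.Str.join " " (w0 :: l) = w0 ++ joinSp l := by
  induction l with
  | nil =>
    intro w0
    rw [← String.toList_inj, PySem.Str.toList_join]
    simp [PySem.Chars.join_singleton, joinSp]
  | cons w t ih =>
    intro w0
    rw [← String.toList_inj, PySem.Str.toList_join] at *
    simp only [List.map_cons] at *
    rw [PySem.Chars.join_cons_cons]
    have := ih w
    simp only [joinSp] at *
    simp only [String.toList_append] at *
    rw [show PySem.Chars.join " ".toList (w.toList :: List.map String.toList t)
          = (PySem.Str.join " " (w :: t)).toList from by rw [PySem.Str.toList_join]; simp]
    rw [ih w]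
    simp [String.toList_append]

-- ===== VERDICT (by name: the statement is the Claim_ definition above) =====
theorem address_splitter_spec : Claim_equal_address_splitter := by
  intro a _
  unfold Spec_address_splitter address_splitter address_splitter_alt
  cases h : PySem.Str.split₀ a with
  | nil => simp [PySem.List.enumerate_nil]
  | cons w0 rest =>
    rw [PySem.List.enumerate_cons]
    simp only [List.foldl_cons]
    rw [show aStep (false, "", "") (0, w0) = (false, w0, "") from by simp [aStep]]
    rw [show (0 : Int) + 1 = 1 from by norm_num]
    rw [foldl_aStep_false rest 1 (by norm_num)]
    have hc : (1 + cutFrom (PySem.Str.len w0) rest : Nat) = cutFrom (PySem.Str.len w0) rest + 1 := by omega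
    simp only [hc, List.take_succ_cons, List.drop_succ_cons]
    rw [join_space_cons, joinWith_eq]
    simp
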